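-- pv_equiv track=rewrite | github.com/DmitriyKlaes/Python_Practice | task013-second_entry_string.py | search_enter
-- ===== SOURCE A (Python) =====
-- def search_enter(arr, string):
--     count = 0
--     for i in range(len(arr)):
--         if arr[i] == string:
--             count += 1
--         if count == 2:
--             return f'yes: {i + 1}'
--     return 'no'
-- ===== SOURCE B (Python) =====
-- def search_enter(arr, string):
--     try:
--         first = arr.index(string)
--         second = arr.index(string, first + 1)
--         return f'yes: {second + 1}'
--     except ValueError:
--         return 'no'
-- ===== Notes on version B (the rewrite author's own statement) =====
-- stated objective: idiomatic
-- what changed: Replaces the manual counting loop with two library index lookups (first occurrence, then next occurrence from first+1) guarded by try/except ValueError.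
import Mathlib
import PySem

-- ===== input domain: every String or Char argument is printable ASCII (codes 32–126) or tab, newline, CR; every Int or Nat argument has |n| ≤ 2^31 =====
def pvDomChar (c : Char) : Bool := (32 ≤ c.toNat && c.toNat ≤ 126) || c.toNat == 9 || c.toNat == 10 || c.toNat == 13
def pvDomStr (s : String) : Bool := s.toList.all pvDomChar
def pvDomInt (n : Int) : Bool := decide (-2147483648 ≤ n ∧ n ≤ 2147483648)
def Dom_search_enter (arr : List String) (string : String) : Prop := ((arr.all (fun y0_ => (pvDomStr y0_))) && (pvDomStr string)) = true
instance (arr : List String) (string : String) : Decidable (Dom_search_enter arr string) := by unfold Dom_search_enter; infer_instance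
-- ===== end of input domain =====

-- B replaces A's manual counting loop by two library index searches (more idiomatic); same O(n) cost.

-- ===== PORT A =====
-- the for-loop over range(len(arr)) with early return, as structural recursion
-- carrying the running index i and the counter count
def search_enter_go (string : String) : List String → Int → Nat → String
  | [], _, _ => "no"
  | x :: xs, i, count =>
    let c := if x == string then count + 1 else count
    if c == 2 then "yes: " ++ PySem.Int.toStr (i + 1)
    else search_enter_go string xs (i + 1) c

def search_enter (arr : List String) (string : String) : String :=
  search_enter_go string arr 0 0

-- ===== PORT B =====
-- arr.index(string) → PySem.List.index?; arr.index(string, first+1) → index? on the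
-- dropped suffix plus the offset (exact for Python's start-offset index); the
-- try/except ValueError becomes matching the two Options.
def search_enter_alt (arr : List String) (string : String) : String :=
  match PySem.List.index? arr string with
  | none => "no"
  | some first =>
    match PySem.List.index? (arr.drop (first + 1)) string with
    | none => "no"
    | some j => "yes: " ++ PySem.Int.toStr ((first : Int) + 1 + j + 1)

-- ===== PRECONDITION & SPEC =====
def Spec_search_enter (arr : List String) (string : String) (out : String) : Prop := out = search_enter_alt arr string
instance (arr : List String) (string : String) (out : String) : Decidable (Spec_search_enter arr string out) := by unfold Spec_search_enter; infer_instance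

-- ===== CLAIM (what is proved, stated in full; the proofs are below) =====
def Claim_equal_search_enter : Prop := ∀ (arr : List String) (string : String), Dom_search_enter arr string → Spec_search_enter arr string (search_enter arr string)

-- ===== LEMMAS AND PROOFS =====
lemma go_one (string : String) (xs : List String) (i : Int) :
    search_enter_go string xs i 1 =
      match PySem.List.index? xs string with
      | none => "no"
      | some j => "yes: " ++ PySem.Int.toStr (i + j + 1) := by
  induction xs generalizing i with
  | nil => simp [search_enter_go, PySem.List.index?]
  | cons x xs ih =>
    by_cases hx : x = string
    · subst hx
      rw [PySem.List.index?_cons_self]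
      simp [search_enter_go]
    · rw [PySem.List.index?_cons_of_ne _ hx]
      simp only [search_enter_go, beq_iff_eq, if_neg hx]
      rw [ih]
      cases h : PySem.List.index? xs string with
      | none => simp
      | some j =>
        simp only [Option.map_some]
        push_cast
        ring_nf

lemma go_zero (string : String) (xs : List String) (i : Int) :
    search_enter_go string xs i 0 =
      match PySem.List.index? xs string with
      | none => "no"
      | some p => search_enter_go string (xs.drop (p + 1)) (i + p + 1) 1 := by
  induction xs generalizing i with
  | nil => simp [search_enter_go, PySem.List.index?]
  | cons x xs ih =>
    by_cases hx : x = string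
    · subst hx
      rw [PySem.List.index?_cons_self]
      simp [search_enter_go]
    · rw [PySem.List.index?_cons_of_ne _ hx]
      simp only [search_enter_go, beq_iff_eq, if_neg hx]
      rw [ih]
      cases h : PySem.List.index? xs string with
      | none => simp
      | some p =>
        simp only [Option.map_some, List.drop_succ_cons]
        push_cast
        ring_nf

-- ===== VERDICT (by name: the statement is the Claim_ definition above) =====
theorem search_enter_spec : Claim_equal_search_enter := by
  intro arr string _
  unfold Spec_search_enter search_enter search_enter_alt
  rw [go_zero]
  cases h : PySem.List.index? arr string with
  | none => rfl
  | some p =>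
    simp only
    rw [go_one]
    cases h2 : PySem.List.index? (arr.drop (p + 1)) string with
    | none => rfl
    | some j =>
      simp only []
      congr 1
      ring_nf
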